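-- pv_equiv track=rewrite | github.com/iml1111/algorithm-study | src/sm_2round.py/3.py | solution
-- ===== SOURCE A (Python) =====
-- def is_two(arr):
--     cnt = 0
--     for i in arr:
--         for _ in i:
--             cnt += 1
--     return cnt == 2
--
-- def get_max(left, right):
--     left_max = max([max(i) for i in left])
--     if is_two(right):
--         right_max = max([max(i) for i in right])
--     else:
--         n = len(right)
--         m = len(right[0])
--         quarters = []
--         if 1 < m:
--             quarters.append(get_max([i[:m // 2] for i in right], [i[m // 2:] for i in right]))
--             quarters.append(get_max([i[m // 2:] for i in right], [i[:m // 2] for i in right]))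
--         if 1 < n:
--             quarters.append(get_max([i for i in right[:n//2]], [i for i in right[n//2:]]))
--             quarters.append(get_max([i for i in right[n//2:]], [i for i in right[:n//2]]))
--         right_max = max(quarters)
--     return left_max + right_max
--
-- def solution(arr):
--     n = len(arr)
--     return max(
--         get_max([i[:n // 2] for i in arr], [i[n // 2:] for i in arr]),
--         get_max([i[n // 2:] for i in arr], [i[:n // 2] for i in arr]),
--         get_max([i for i in arr[:n//2]], [i for i in arr[n//2:]]),
--         get_max([i for i in arr[n//2:]], [i for i in arr[:n//2]])
--     )
-- ===== SOURCE B (Python) =====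
-- def solution(arr):
--     # Top-down DP on block coordinates: the same recursive partition values,
--     # but computed on (row, height, col, width) dyadic blocks with memoization
--     # instead of repeatedly copying list slices.
--     n = len(arr)
--     memo = {}
--
--     def blockmax(r, h, c, w):
--         best = arr[r][c]
--         for i in range(r, r + h):
--             for j in range(c, c + w):
--                 if best < arr[i][j]:
--                     best = arr[i][j]
--         return best
--
--     def f(r, h, c, w):
--         key = (r, h, c, w)
--         if key in memo:
--             return memo[key]
--         if h * w == 2:
--             v = blockmax(r, h, c, w)
--         else:
--             cand = []
--             if 1 < w:
--                 cand.append(blockmax(r, h, c, w // 2) + f(r, h, c + w // 2, w // 2))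
--                 cand.append(blockmax(r, h, c + w // 2, w // 2) + f(r, h, c, w // 2))
--             if 1 < h:
--                 cand.append(blockmax(r, h // 2, c, w) + f(r + h // 2, h // 2, c, w))
--                 cand.append(blockmax(r + h // 2, h // 2, c, w) + f(r, h // 2, c, w))
--             v = max(cand)
--         memo[key] = v
--         return v
--
--     return f(0, n, 0, n)
-- ===== Notes on version B (the rewrite author's own statement) =====
-- stated objective: faster
-- what changed: Replaces the naive recursion that repeatedly copies list slices with a memoized top-down DP over (row, height, col, width) coordinates of the dyadic blocks, so overlapping sub-blocks (reachable by splitting rows and columns in different orders) are computed once.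
import Mathlib
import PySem

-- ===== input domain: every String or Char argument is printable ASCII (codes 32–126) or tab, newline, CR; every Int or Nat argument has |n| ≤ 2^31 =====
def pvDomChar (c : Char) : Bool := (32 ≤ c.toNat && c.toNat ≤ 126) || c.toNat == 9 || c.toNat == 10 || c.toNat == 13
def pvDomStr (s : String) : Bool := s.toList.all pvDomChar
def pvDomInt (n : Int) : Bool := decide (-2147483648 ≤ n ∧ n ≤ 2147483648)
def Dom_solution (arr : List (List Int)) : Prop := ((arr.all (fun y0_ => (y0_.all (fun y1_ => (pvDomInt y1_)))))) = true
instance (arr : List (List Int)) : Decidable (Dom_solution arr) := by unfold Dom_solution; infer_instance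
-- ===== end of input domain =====

-- B replaces A's naive recursion on copied list slices by a memoized top-down DP on
-- (row, height, col, width) coordinates of the dyadic blocks (overlapping sub-blocks are
-- computed once); a timing run measured B faster.

-- total element count, used as termination measure for get_max
def pvTot (xs : List (List Int)) : Nat := (xs.map List.length).sum

theorem pvTot_map_le (xs : List (List Int)) (f : List Int → List Int)
    (hf : ∀ i, (f i).length ≤ i.length) : pvTot (xs.map f) ≤ pvTot xs := by
  induction xs with
  | nil => simp [pvTot]
  | cons x xs ih =>
    simp only [pvTot, List.map_cons, List.sum_cons] at *
    exact Nat.add_le_add (hf x) ih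

theorem pvTot_map_lt (r0 : List Int) (rs : List (List Int)) (f : List Int → List Int)
    (hf : ∀ i, (f i).length ≤ i.length) (h0 : (f r0).length < r0.length) :
    pvTot ((r0 :: rs).map f) < pvTot (r0 :: rs) := by
  simp only [pvTot, List.map_cons, List.sum_cons] at *
  have := pvTot_map_le rs f hf
  simp only [pvTot] at this
  omega

theorem pvTot_take_le (xs : List (List Int)) (k : Nat) : pvTot (xs.take k) ≤ pvTot xs := by
  have : pvTot (xs.take k) + pvTot (xs.drop k) = pvTot xs := by
    simp [pvTot, ← List.sum_append]
  omega

theorem pvTot_drop_le (xs : List (List Int)) (k : Nat) : pvTot (xs.drop k) ≤ pvTot xs := by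
  have : pvTot (xs.take k) + pvTot (xs.drop k) = pvTot xs := by
    simp [pvTot, ← List.sum_append]
  omega

theorem pvLexTotLt {x y : List (List Int)} (h : pvTot x < pvTot y) :
    Prod.Lex (fun a b => a < b) (fun a b => a < b) (pvTot x, x.length) (pvTot y, y.length) :=
  Prod.Lex.left _ _ h

theorem pvLexTot {x y : List (List Int)} (h1 : pvTot x ≤ pvTot y) (h2 : x.length < y.length) :
    Prod.Lex (fun a b => a < b) (fun a b => a < b) (pvTot x, x.length) (pvTot y, y.length) := by
  rcases Nat.lt_or_ge (pvTot x) (pvTot y) with h | h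
  · exact Prod.Lex.left _ _ h
  · rw [le_antisymm h1 h]; exact Prod.Lex.right _ h2

-- ===== PORT A =====
-- max([max(i) for i in xs]); none = ValueError (empty xs or an empty row)
def pyMaxRows (xs : List (List Int)) : Option Int :=
  (xs.mapM (fun i => PySem.List.max? i (fun y => y))).bind
    (fun ms => PySem.List.max? ms (fun y => y))

def is_two (arr : List (List Int)) : Bool :=
  (arr.foldl (fun c i => i.foldl (fun c _ => c + 1) c) (0 : Int)) == 2

-- nonnegative Python slices i[:k] / i[k:] are take/drop (exact: both clamp);
-- right[0] on empty right raises IndexError = the none branch of the match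
def get_max (left right : List (List Int)) : Option Int :=
  (pyMaxRows left).bind (fun left_max =>
    (if is_two right then pyMaxRows right
     else
       match right with
       | [] => none
       | r0 :: rs =>
         let n := (r0 :: rs).length
         let m := r0.length
         (if _hm : 1 < m then
             (get_max ((r0 :: rs).map (fun i => i.take (m / 2)))
                      ((r0 :: rs).map (fun i => i.drop (m / 2)))).bind (fun q1 =>
             (get_max ((r0 :: rs).map (fun i => i.drop (m / 2)))
                      ((r0 :: rs).map (fun i => i.take (m / 2)))).bind (fun q2 =>
             some [q1, q2]))
           else some []).bind (fun qs =>
         (if _hn : 1 < n then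
             (get_max ((r0 :: rs).take (n / 2)) ((r0 :: rs).drop (n / 2))).bind (fun q3 =>
             (get_max ((r0 :: rs).drop (n / 2)) ((r0 :: rs).take (n / 2))).bind (fun q4 =>
             some (qs ++ [q3, q4])))
           else some qs).bind (fun quarters =>
         PySem.List.max? quarters (fun y => y)))).bind (fun right_max =>
    some (left_max + right_max)))
termination_by (pvTot right, right.length)
decreasing_by
  all_goals first
  | exact pvLexTotLt (pvTot_map_lt _ _ _
      (fun i => by simp only [List.length_take]; omega)
      (by simp only [List.length_take]; omega))
  | exact pvLexTotLt (pvTot_map_lt _ _ _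
      (fun i => by simp only [List.length_drop]; omega)
      (by simp only [List.length_drop]; omega))
  | exact pvLexTot (pvTot_take_le _ _)
      (by have h1 : n = (r0 :: rs).length := rfl
          simp only [List.length_take, List.length_cons] at *
          omega)
  | exact pvLexTot (pvTot_drop_le _ _)
      (by have h1 : n = (r0 :: rs).length := rfl
          simp only [List.length_drop, List.length_cons] at *
          omega)

def solution (arr : List (List Int)) : Int :=
  (let n := arr.length
   (get_max (arr.map (fun i => i.take (n / 2))) (arr.map (fun i => i.drop (n / 2)))).bind (fun a =>
   (get_max (arr.map (fun i => i.drop (n / 2))) (arr.map (fun i => i.take (n / 2)))).bind (fun b =>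
   (get_max (arr.take (n / 2)) (arr.drop (n / 2))).bind (fun c =>
   (get_max (arr.drop (n / 2)) (arr.take (n / 2))).bind (fun d =>
   some (max (max (max a b) c) d)))))).getD 0

-- ===== PORT B =====
def pvHalf (x : Int) : Int := PySem.Int.floordiv x 2

def blockmax_alt (arr : List (List Int)) (r h c w : Int) : Option Int :=
  ((PySem.List.pyGet? arr r).bind (fun row => PySem.List.pyGet? row c)).bind (fun b0 =>
  (PySem.List.pyRange r (r + h) 1).foldlM (fun best i =>
    (PySem.List.pyRange c (c + w) 1).foldlM (fun best j =>
      ((PySem.List.pyGet? arr i).bind (fun row => PySem.List.pyGet? row j)).map (fun v =>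
        if best < v then v else best)) best) b0)

def f_alt (arr : List (List Int)) (r h c w : Int)
    (memo : PySem.Dict (Int × Int × Int × Int) Int) :
    Option (Int × PySem.Dict (Int × Int × Int × Int) Int) :=
  match memo.get? (r, h, c, w) with
  | some v => some (v, memo)
  | none =>
    Option.map (fun p => (p.1, PySem.Dict.insert p.2 (r, h, c, w) p.1))
      (if h * w == 2 then
        (blockmax_alt arr r h c w).map (fun v => (v, memo))
      else
        (if _hw : 1 < w then
            (blockmax_alt arr r h c (pvHalf w)).bind (fun m1 =>
            (f_alt arr r h (c + pvHalf w) (pvHalf w) memo).bind (fun p1 =>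
            (blockmax_alt arr r h (c + pvHalf w) (pvHalf w)).bind (fun m2 =>
            (f_alt arr r h c (pvHalf w) p1.2).bind (fun p2 =>
            some ([m1 + p1.1, m2 + p2.1], p2.2)))))
          else some ([], memo)).bind (fun s1 =>
        (if _hh : 1 < h then
            (blockmax_alt arr r (pvHalf h) c w).bind (fun m1 =>
            (f_alt arr (r + pvHalf h) (pvHalf h) c w s1.2).bind (fun p1 =>
            (blockmax_alt arr (r + pvHalf h) (pvHalf h) c w).bind (fun m2 =>
            (f_alt arr r (pvHalf h) c w p1.2).bind (fun p2 =>
            some (s1.1 ++ [m1 + p1.1, m2 + p2.1], p2.2)))))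
          else some s1).bind (fun s2 =>
        (PySem.List.max? s2.1 (fun y => y)).map (fun v => (v, s2.2)))))
termination_by h.toNat + w.toNat
decreasing_by
  all_goals
    simp only [pvHalf, PySem.Int.floordiv_eq_ediv_of_pos (by norm_num : (0:Int) < 2)]
    omega

def solution_alt (arr : List (List Int)) : Int :=
  (let n : Int := arr.length
   (f_alt arr 0 n 0 n PySem.Dict.empty).map Prod.fst).getD 0

-- ===== PRECONDITION & SPEC =====
-- Pre: a square grid whose side is a power of two (≥ 2); on every other input the
-- Python A raises (ValueError on max([]) or IndexError), so nothing is excluded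
-- on which A returns.
def Pre_solution (arr : List (List Int)) : Prop :=
  (∃ k, k < arr.length ∧ arr.length = 2 ^ (k + 1)) ∧ ∀ row ∈ arr, row.length = arr.length
instance (arr : List (List Int)) : Decidable (Pre_solution arr) := by
  unfold Pre_solution; infer_instance

def pvWitness_solution : List (List Int) := [[1, 2], [3, 4]]

def Spec_solution (arr : List (List Int)) (out : Int) : Prop := out = solution_alt arr
instance (arr : List (List Int)) (out : Int) : Decidable (Spec_solution arr out) := by
  unfold Spec_solution; infer_instance

-- ===== CLAIM (what is proved, stated in full; the proofs are below) =====
def Claim_equal_solution : Prop :=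
  ∀ (arr : List (List Int)), Dom_solution arr → Pre_solution arr → Spec_solution arr (solution arr)

-- ===== LEMMAS AND PROOFS =====

-- the value of a cell, total-function form used throughout the proofs
def pvVal (arr : List (List Int)) (i j : Nat) : Int := (arr.getD i []).getD j 0

-- the sub-block of arr: rows [r, r+h), columns [c, c+w)
def pvSub (arr : List (List Int)) (r h c w : Nat) : List (List Int) :=
  ((arr.drop r).take h).map (fun row => (row.drop c).take w)

-- "m is the maximum of block (r,h,c,w)"
def pvIsMax (arr : List (List Int)) (r h c w : Nat) (m : Int) : Prop :=
  (∃ i j, i < h ∧ j < w ∧ pvVal arr (r + i) (c + j) = m) ∧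
  (∀ i j, i < h → j < w → pvVal arr (r + i) (c + j) ≤ m)

-- memo-free mirror of f_alt, the induction anchor between the two ports
def Fpure (arr : List (List Int)) (r h c w : Int) : Option Int :=
  if h * w == 2 then blockmax_alt arr r h c w
  else
    (if _hw : 1 < w then
        (blockmax_alt arr r h c (pvHalf w)).bind (fun m1 =>
        (Fpure arr r h (c + pvHalf w) (pvHalf w)).bind (fun v1 =>
        (blockmax_alt arr r h (c + pvHalf w) (pvHalf w)).bind (fun m2 =>
        (Fpure arr r h c (pvHalf w)).bind (fun v2 =>
        some [m1 + v1, m2 + v2]))))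
      else some []).bind (fun cand1 =>
    (if _hh : 1 < h then
        (blockmax_alt arr r (pvHalf h) c w).bind (fun m1 =>
        (Fpure arr (r + pvHalf h) (pvHalf h) c w).bind (fun v1 =>
        (blockmax_alt arr (r + pvHalf h) (pvHalf h) c w).bind (fun m2 =>
        (Fpure arr r (pvHalf h) c w).bind (fun v2 =>
        some (cand1 ++ [m1 + v1, m2 + v2])))))
      else some cand1).bind (fun cand =>
    PySem.List.max? cand (fun y => y)))
termination_by h.toNat + w.toNat
decreasing_by
  all_goals
    simp only [pvHalf, PySem.Int.floordiv_eq_ediv_of_pos (by norm_num : (0:Int) < 2)]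
    omega

def GoodMemo (arr : List (List Int)) (memo : PySem.Dict (Int × Int × Int × Int) Int) : Prop :=
  ∀ r h c w v, memo.get? (r, h, c, w) = some v → Fpure arr r h c w = some v

-- ---- counting ----
theorem pv_cnt_inner (i : List Int) (c : Int) :
    i.foldl (fun c _ => c + 1) c = c + i.length := by
  induction i generalizing c with
  | nil => simp
  | cons x t ih => simp [ih]; omega

theorem pv_cnt_eq (xs : List (List Int)) : ∀ c : Int,
    xs.foldl (fun c i => i.foldl (fun c _ => c + 1) c) c = c + pvTot xs := by
  induction xs with
  | nil => intro c; simp [pvTot]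
  | cons x t ih =>
    intro c
    rw [List.foldl_cons, ih]
    simp only [pv_cnt_inner]
    simp only [pvTot, List.map_cons, List.sum_cons]
    push_cast
    ring

theorem pv_is_two_iff (R : List (List Int)) : is_two R = true ↔ pvTot R = 2 := by
  simp [is_two, pv_cnt_eq]
  omega

-- ---- max folds ----
theorem pv_step_eq_max (b v : Int) : (if b < v then v else b) = max b v := by
  rcases lt_trichotomy b v with h | h | h <;> simp [max_def] <;> omega

theorem pv_le_foldl_max_init (l : List Int) (b : Int) : b ≤ l.foldl max b := by
  induction l generalizing b with
  | nil => simp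
  | cons x t ih => exact le_trans (le_max_left b x) (ih (max b x))

theorem pv_le_foldl_max_mem : ∀ (l : List Int) (x : Int), x ∈ l → ∀ b, x ≤ l.foldl max b := by
  intro l
  induction l with
  | nil => intro x hx; cases hx
  | cons y t ih =>
    intro x hx b
    rcases List.mem_cons.mp hx with rfl | h
    · exact le_trans (le_max_right b x) (pv_le_foldl_max_init t (max b x))
    · exact ih x h (max b y)

theorem pv_foldl_max_cases : ∀ (l : List Int) (b : Int), l.foldl max b = b ∨ l.foldl max b ∈ l := by
  intro l
  induction l with
  | nil => intro b; left; rfl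
  | cons x t ih =>
    intro b
    rcases ih (max b x) with h | h
    · rw [List.foldl_cons, h]
      rcases max_choice b x with h2 | h2
      · left; exact h2
      · right; rw [h2]; exact List.mem_cons_self ..
    · right; exact List.mem_cons_of_mem x h

-- ---- mapM over Option when everything succeeds ----
theorem pv_mapM_some (xs : List (List Int)) (f : List Int → Option Int) (g : List Int → Int)
    (h : ∀ i ∈ xs, f i = some (g i)) : xs.mapM f = some (xs.map g) := by
  induction xs with
  | nil => simp
  | cons x t ih =>
    rw [List.mapM_cons, h x (by simp), ih (fun i hi => h i (by simp [hi]))]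
    rfl

-- ---- pyMaxRows characterization ----
def pvRowMax (row : List Int) : Int := match row with | [] => 0 | x :: t => t.foldl max x

theorem pv_val_eq (arr : List (List Int)) (i j : Nat) (hi : i < arr.length)
    (hj : j < (arr[i]'hi).length) : pvVal arr i j = (arr[i]'hi)[j]'hj := by
  have h1 : arr.getD i [] = arr[i]'hi := List.getD_eq_getElem _ _ hi
  rw [pvVal, h1, List.getD_eq_getElem _ _ hj]

theorem pv_pyMaxRows_spec (R : List (List Int)) (hne : R ≠ []) (hrows : ∀ row ∈ R, row ≠ []) :
    ∃ m, pyMaxRows R = some m ∧ (∃ row ∈ R, m ∈ row) ∧ (∀ row ∈ R, ∀ x ∈ row, x ≤ m) := by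
  have hrowmax : ∀ row ∈ R, pvRowMax row ∈ row ∧ ∀ x ∈ row, x ≤ pvRowMax row := by
    intro row hrow
    match row, hrows row hrow with
    | x :: t, _ =>
      constructor
      · rcases pv_foldl_max_cases t x with h | h
        · simp [pvRowMax, h]
        · simp [pvRowMax]; right; exact h
      · intro y hy
        rcases List.mem_cons.mp hy with rfl | hy
        · exact pv_le_foldl_max_init t y
        · exact pv_le_foldl_max_mem t y hy x

  have hmapM : R.mapM (fun i => PySem.List.max? i (fun y => y)) = some (R.map pvRowMax) := by
    apply pv_mapM_some
    intro i hi
    match i, hrows i hi with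
    | x :: t, _ => exact PySem.List.max?_id_cons x t
  match R, hne, hrowmax with
  | r0 :: rs, _, hrowmax =>
    refine ⟨(rs.map pvRowMax).foldl max (pvRowMax r0), ?_, ?_, ?_⟩
    · simp only [pyMaxRows, hmapM, Option.bind_some, List.map_cons]
      exact PySem.List.max?_id_cons (pvRowMax r0) (rs.map pvRowMax)
    · rcases pv_foldl_max_cases (rs.map pvRowMax) (pvRowMax r0) with h | h
      · rw [h]; exact ⟨r0, by simp, (hrowmax r0 (by simp)).1⟩
      · rw [List.mem_map] at h
        obtain ⟨row, hrow, heq⟩ := h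
        exact ⟨row, by simp [hrow], heq ▸ (hrowmax row (by simp [hrow])).1⟩
    · intro row hrow x hx
      rcases List.mem_cons.mp hrow with rfl | hrow
      · exact le_trans ((hrowmax row (by simp)).2 x hx)
          (pv_le_foldl_max_init (rs.map pvRowMax) (pvRowMax row))
      · exact le_trans ((hrowmax row (by simp [hrow])).2 x hx)
          (pv_le_foldl_max_mem (rs.map pvRowMax) (pvRowMax row) (List.mem_map_of_mem hrow) (pvRowMax r0))

-- ---- scans: B's index loops compute block maxima ----
theorem pv_scan_row (arr : List (List Int)) (i c : Nat) (hi : i < arr.length) :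
    ∀ w : Nat, c + w ≤ (arr[i]'hi).length → ∀ b : Int,
    (PySem.List.pyRange (c : Int) ((c : Int) + ((w : Nat) : Int)) 1).foldlM
      (fun best j => ((PySem.List.pyGet? arr ((i : Nat) : Int)).bind
        (fun row => PySem.List.pyGet? row j)).map (fun v => if best < v then v else best)) b
    = some ((List.range w).foldl (fun b j => max b (pvVal arr i (c + j))) b) := by
  intro w
  induction w with
  | zero =>
    intro _ b
    rw [PySem.List.pyRange_one]
    simp
  | succ w ih =>
    intro hw b
    have e1 : (((c : Int) + ((w + 1 : Nat) : Int)) - (c : Int)).toNat = w + 1 := by omega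
    have e2 : (List.range w).map (fun k : Nat => (c : Int) + (k : Int))
        = PySem.List.pyRange (c : Int) ((c : Int) + ((w : Nat) : Int)) 1 := by
      have e : (((c : Int) + ((w : Nat) : Int)) - (c : Int)).toNat = w := by omega
      rw [PySem.List.pyRange_one, e]
    rw [PySem.List.pyRange_one, e1, List.range_succ, List.map_append, List.foldlM_append]
    rw [e2, ih (by omega) b]
    have hcw : c + w < (arr[i]'hi).length := by omega
    have e3 : PySem.List.pyGet? arr ((i : Nat) : Int) = some (arr[i]'hi) := by
      rw [PySem.List.pyGet?_natCast, List.getElem?_eq_getElem hi]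
    have e4 : ((c : Int) + ((w : Nat) : Int)) = (((c + w : Nat) : Nat) : Int) := by push_cast; ring
    have e5 : PySem.List.pyGet? (arr[i]'hi) (((c + w : Nat) : Nat) : Int)
        = some ((arr[i]'hi)[c + w]'hcw) := by
      rw [PySem.List.pyGet?_natCast, List.getElem?_eq_getElem hcw]
    simp only [List.map_cons, List.map_nil, List.foldlM_cons, List.foldlM_nil,
      Option.bind_some, e3, e4, e5, Option.map_some, Option.pure_def]
    rw [List.foldl_append]
    simp only [List.foldl_cons, List.foldl_nil]
    simp [pv_step_eq_max, pv_val_eq arr i (c + w) hi hcw]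

theorem pv_scan_block (arr : List (List Int)) (hrect : ∀ row ∈ arr, row.length = arr.length)
    (c w r : Nat) (hc : c + w ≤ arr.length) :
    ∀ h : Nat, r + h ≤ arr.length → ∀ b : Int,
    (PySem.List.pyRange (r : Int) ((r : Int) + ((h : Nat) : Int)) 1).foldlM
      (fun best i => (PySem.List.pyRange (c : Int) ((c : Int) + ((w : Nat) : Int)) 1).foldlM
        (fun best j => ((PySem.List.pyGet? arr i).bind
          (fun row => PySem.List.pyGet? row j)).map (fun v => if best < v then v else best)) best) b
    = some ((List.range h).foldl (fun b i => (List.range w).foldl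
        (fun b j => max b (pvVal arr (r + i) (c + j))) b) b) := by
  intro h
  induction h with
  | zero =>
    intro _ b
    rw [PySem.List.pyRange_one]
    simp
  | succ h ih =>
    intro hh b
    have e1 : (((r : Int) + ((h + 1 : Nat) : Int)) - (r : Int)).toNat = h + 1 := by omega
    have e2 : (List.range h).map (fun k : Nat => (r : Int) + (k : Int))
        = PySem.List.pyRange (r : Int) ((r : Int) + ((h : Nat) : Int)) 1 := by
      have e : (((r : Int) + ((h : Nat) : Int)) - (r : Int)).toNat = h := by omega
      rw [PySem.List.pyRange_one, e]
    rw [PySem.List.pyRange_one ((r : Nat) : Int) (((r : Nat) : Int) + ((h + 1 : Nat) : Int)),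
      e1, List.range_succ, List.map_append, List.foldlM_append]
    rw [e2, ih (by omega) b]
    have hrh : r + h < arr.length := by omega
    have e4 : ((r : Int) + ((h : Nat) : Int)) = (((r + h : Nat) : Nat) : Int) := by push_cast; ring
    have hlen : c + w ≤ (arr[r + h]'hrh).length := by
      rw [hrect _ (List.getElem_mem _)]; exact hc
    simp only [List.map_cons, List.map_nil, List.foldlM_cons, List.foldlM_nil,
      Option.pure_def, Option.bind_eq_bind, Option.bind_some, e4]
    rw [pv_scan_row arr (r + h) c hrh w hlen]
    simp only [Option.bind_eq_bind, Option.bind_some]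
    rw [List.foldl_append]
    simp

def pvCellVals (arr : List (List Int)) (r h c w : Nat) : List Int :=
  (List.range h).flatMap (fun i => (List.range w).map (fun j => pvVal arr (r + i) (c + j)))

theorem pv_nested_eq_flat (arr : List (List Int)) (r c w : Nat) :
    ∀ (h : Nat) (b : Int),
    (List.range h).foldl (fun b i => (List.range w).foldl
      (fun b j => max b (pvVal arr (r + i) (c + j))) b) b
    = (pvCellVals arr r h c w).foldl max b := by
  intro h
  induction h with
  | zero => intro b; simp [pvCellVals]
  | succ h ih =>
    intro b
    rw [List.range_succ, List.foldl_append, ih]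
    simp only [pvCellVals, List.range_succ, List.flatMap_append, List.foldl_append]
    simp [List.foldl_map]

theorem pv_mem_cellVals (arr : List (List Int)) (r h c w : Nat) (x : Int) :
    x ∈ pvCellVals arr r h c w ↔ ∃ i j, i < h ∧ j < w ∧ pvVal arr (r + i) (c + j) = x := by
  simp only [pvCellVals, List.mem_flatMap, List.mem_map, List.mem_range]
  constructor
  · rintro ⟨i, hi, j, hj, hx⟩
    exact ⟨i, j, hi, hj, hx⟩
  · rintro ⟨i, j, hi, hj, hx⟩
    exact ⟨i, hi, j, hj, hx⟩

-- ---- blockmax characterization ----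
theorem pv_isMax_unique (arr : List (List Int)) (r h c w : Nat) (m1 m2 : Int)
    (h1 : pvIsMax arr r h c w m1) (h2 : pvIsMax arr r h c w m2) : m1 = m2 := by
  obtain ⟨⟨i1, j1, hi1, hj1, he1⟩, hb1⟩ := h1
  obtain ⟨⟨i2, j2, hi2, hj2, he2⟩, hb2⟩ := h2
  exact le_antisymm (he1 ▸ hb2 i1 j1 hi1 hj1) (he2 ▸ hb1 i2 j2 hi2 hj2)

theorem pv_blockmax_isMax (arr : List (List Int)) (r h c w : Nat)
    (hrect : ∀ row ∈ arr, row.length = arr.length)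
    (hr : r + h ≤ arr.length) (hc : c + w ≤ arr.length) (hh : 1 ≤ h) (hw : 1 ≤ w) :
    ∃ m, blockmax_alt arr (r : Int) (h : Int) (c : Int) (w : Int) = some m ∧ pvIsMax arr r h c w m := by
  have hi0 : r < arr.length := by omega
  have hrl : (arr[r]'hi0).length = arr.length := hrect _ (List.getElem_mem _)
  have hc0 : c < (arr[r]'hi0).length := by omega
  have e1 : PySem.List.pyGet? arr ((r : Nat) : Int) = some (arr[r]'hi0) := by
    rw [PySem.List.pyGet?_natCast, List.getElem?_eq_getElem hi0]
  have e2 : PySem.List.pyGet? (arr[r]'hi0) ((c : Nat) : Int) = some ((arr[r]'hi0)[c]'hc0) := by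
    rw [PySem.List.pyGet?_natCast, List.getElem?_eq_getElem hc0]
  have hb0 : (arr[r]'hi0)[c]'hc0 = pvVal arr r c := (pv_val_eq arr r c hi0 hc0).symm
  refine ⟨(pvCellVals arr r h c w).foldl max (pvVal arr r c), ?_, ?_, ?_⟩
  · unfold blockmax_alt
    rw [e1]
    simp only [Option.bind_some]
    rw [e2]
    simp only [Option.bind_some, hb0]
    rw [pv_scan_block arr hrect c w r hc h hr (pvVal arr r c), pv_nested_eq_flat]
  · rcases pv_foldl_max_cases (pvCellVals arr r h c w) (pvVal arr r c) with he | he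
    · exact ⟨0, 0, by omega, by omega, by rw [he]; simp⟩
    · exact (pv_mem_cellVals arr r h c w _).mp he
  · intro i j hi hj
    exact pv_le_foldl_max_mem _ _ ((pv_mem_cellVals arr r h c w _).mpr ⟨i, j, hi, hj, rfl⟩) _

-- ---- pvSub shape and membership ----
theorem pv_sub_length (arr : List (List Int)) (r h c w : Nat) (hr : r + h ≤ arr.length) :
    (pvSub arr r h c w).length = h := by
  simp [pvSub]; omega

theorem pv_sub_rows (arr : List (List Int)) (r h c w : Nat)
    (hrect : ∀ row ∈ arr, row.length = arr.length) (hc : c + w ≤ arr.length) :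
    ∀ row ∈ pvSub arr r h c w, row.length = w := by
  intro row hrow
  simp only [pvSub, List.mem_map] at hrow
  obtain ⟨row', hrow', rfl⟩ := hrow
  have : row' ∈ arr := List.mem_of_mem_drop (List.mem_of_mem_take hrow')
  have := hrect row' this
  simp [List.length_take, List.length_drop, this]; omega

theorem pv_sub_mem_iff (arr : List (List Int)) (r h c w : Nat)
    (hrect : ∀ row ∈ arr, row.length = arr.length)
    (hr : r + h ≤ arr.length) (hc : c + w ≤ arr.length) (x : Int) :
    (∃ row ∈ pvSub arr r h c w, x ∈ row) ↔
      (∃ i j, i < h ∧ j < w ∧ pvVal arr (r + i) (c + j) = x) := by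
  have hlen : ((arr.drop r).take h).length = h := by simp; omega
  constructor
  · rintro ⟨row, hrow, hx⟩
    simp only [pvSub, List.mem_map] at hrow
    obtain ⟨row', hrow', rfl⟩ := hrow
    rw [List.mem_iff_getElem] at hrow'
    obtain ⟨i, hi, hieq⟩ := hrow'
    rw [hlen] at hi
    have hrieq : row' = arr[r + i]'(by omega) := by
      rw [← hieq]
      simp [List.getElem_take, List.getElem_drop]
    have hrl : row'.length = arr.length := hrect row' (hrieq ▸ List.getElem_mem _)
    rw [List.mem_iff_getElem] at hx
    obtain ⟨j, hj, hjeq⟩ := hx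
    have hjlen : ((row'.drop c).take w).length = w := by simp [hrl]; omega
    rw [hjlen] at hj
    refine ⟨i, j, hi, hj, ?_⟩
    rw [← hjeq]
    simp only [List.getElem_take, List.getElem_drop]
    rw [pv_val_eq arr (r + i) (c + j) (by omega) (by rw [hrect _ (List.getElem_mem _)]; omega)]
    congr 1
    exact hrieq.symm
  · rintro ⟨i, j, hi, hj, rfl⟩
    have hil : r + i < arr.length := by omega
    have hrl : (arr[r + i]'hil).length = arr.length := hrect _ (List.getElem_mem _)
    refine ⟨((arr[r + i]'hil).drop c).take w, ?_, ?_⟩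
    · simp only [pvSub, List.mem_map]
      refine ⟨arr[r + i]'hil, ?_, rfl⟩
      rw [List.mem_iff_getElem]
      refine ⟨i, by rw [hlen]; exact hi, ?_⟩
      simp [List.getElem_take, List.getElem_drop]
    · rw [List.mem_iff_getElem]
      have hjlen : (((arr[r + i]'hil).drop c).take w).length = w := by simp [hrl]; omega
      refine ⟨j, by rw [hjlen]; exact hj, ?_⟩
      simp only [List.getElem_take, List.getElem_drop]
      rw [pv_val_eq arr (r + i) (c + j) (by omega) (by rw [hrect _ (List.getElem_mem _)]; omega)]

theorem pv_sub_tot (arr : List (List Int)) (r h c w : Nat)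
    (hrect : ∀ row ∈ arr, row.length = arr.length)
    (hr : r + h ≤ arr.length) (hc : c + w ≤ arr.length) :
    pvTot (pvSub arr r h c w) = h * w := by
  unfold pvTot
  have hmap : (pvSub arr r h c w).map List.length = List.replicate h w := by
    rw [List.eq_replicate_iff]
    refine ⟨by simp [pv_sub_length arr r h c w hr], ?_⟩
    intro x hx
    simp only [List.mem_map] at hx
    obtain ⟨row, hrow, rfl⟩ := hx
    exact pv_sub_rows arr r h c w hrect hc row hrow
  rw [hmap, List.sum_replicate, smul_eq_mul]

-- the bridge: A's max-of-rows on the copied block IS B's coordinate scan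
theorem pv_pyMaxRows_sub (arr : List (List Int)) (r h c w : Nat)
    (hrect : ∀ row ∈ arr, row.length = arr.length)
    (hr : r + h ≤ arr.length) (hc : c + w ≤ arr.length) (hh : 1 ≤ h) (hw : 1 ≤ w) :
    pyMaxRows (pvSub arr r h c w) = blockmax_alt arr (r : Int) (h : Int) (c : Int) (w : Int) := by
  obtain ⟨m1, hbm, hmax1⟩ := pv_blockmax_isMax arr r h c w hrect hr hc hh hw
  have hne : pvSub arr r h c w ≠ [] := by
    have := pv_sub_length arr r h c w hr
    intro he
    rw [he] at this
    simp at this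
    omega
  have hrows : ∀ row ∈ pvSub arr r h c w, row ≠ [] := by
    intro row hrow he
    have := pv_sub_rows arr r h c w hrect hc row hrow
    rw [he] at this
    simp at this
    omega
  obtain ⟨m2, hpm, hmem, hbound⟩ := pv_pyMaxRows_spec (pvSub arr r h c w) hne hrows
  have hmax2 : pvIsMax arr r h c w m2 := by
    constructor
    · exact (pv_sub_mem_iff arr r h c w hrect hr hc m2).mp hmem
    · intro i j hi hj
      obtain ⟨row, hrow, hx⟩ := (pv_sub_mem_iff arr r h c w hrect hr hc
        (pvVal arr (r + i) (c + j))).mpr ⟨i, j, hi, hj, rfl⟩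
      exact hbound row hrow _ hx
  rw [hpm, hbm, pv_isMax_unique arr r h c w m2 m1 hmax2 hmax1]

-- ---- splitting pvSub ----
theorem pv_sub_take_cols (arr : List (List Int)) (r h c w k : Nat) (hk : k ≤ w) :
    (pvSub arr r h c w).map (fun i => i.take k) = pvSub arr r h c k := by
  simp [pvSub, Function.comp_def, List.take_take, Nat.min_eq_left hk]

theorem pv_sub_drop_cols (arr : List (List Int)) (r h c w k : Nat) :
    (pvSub arr r h c w).map (fun i => i.drop k) = pvSub arr r h (c + k) (w - k) := by
  simp [pvSub, Function.comp_def, List.drop_take, List.drop_drop]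

theorem pv_sub_take_rows (arr : List (List Int)) (r h c w k : Nat) (hk : k ≤ h) :
    (pvSub arr r h c w).take k = pvSub arr r k c w := by
  simp [pvSub, ← List.map_take, List.take_take, Nat.min_eq_left hk]

theorem pv_sub_drop_rows (arr : List (List Int)) (r h c w k : Nat) :
    (pvSub arr r h c w).drop k = pvSub arr (r + k) (h - k) c w := by
  simp [pvSub, ← List.map_drop, List.drop_take, List.drop_drop]

-- ---- casts ----
theorem pv_half_cast (x : Nat) : pvHalf (x : Int) = ((x / 2 : Nat) : Int) := by
  simp only [pvHalf, PySem.Int.floordiv_eq_ediv_of_pos (by norm_num : (0:Int) < 2)]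
  omega

-- ---- memo soundness: f_alt computes Fpure ----
theorem pv_good_insert (arr : List (List Int)) (memo : PySem.Dict (Int × Int × Int × Int) Int)
    (hgood : GoodMemo arr memo) (r h c w v : Int)
    (hF : Fpure arr r h c w = some v) :
    GoodMemo arr (memo.insert (r, h, c, w) v) := by
  intro r' h' c' w' v' hv'
  rw [PySem.Dict.get?_insert] at hv'
  split at hv'
  · rename_i heq
    rw [Prod.ext_iff, Prod.ext_iff, Prod.ext_iff] at heq
    obtain ⟨h1, h2, h3, h4⟩ := heq
    dsimp at h1 h2 h3 h4
    subst h1; subst h2; subst h3; subst h4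
    injection hv' with hv'
    rw [← hv']
    exact hF
  · exact hgood _ _ _ _ _ hv'

theorem pv_f_alt_eq (arr : List (List Int)) :
    ∀ N, ∀ r h c w : Int, h.toNat + w.toNat ≤ N → ∀ memo, GoodMemo arr memo →
    ∃ memo', GoodMemo arr memo' ∧
      f_alt arr r h c w memo = (Fpure arr r h c w).map (fun v => (v, memo')) := by
  intro N
  induction N using Nat.strong_induction_on with
  | _ N ihN =>
  intro r h c w hN memo hgood
  rw [f_alt.eq_def]
  cases hget : memo.get? (r, h, c, w) with
  | some v =>
    refine ⟨memo, hgood, ?_⟩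
    rw [hgood r h c w v hget]
    rfl
  | none =>
    simp only []
    by_cases hbase : (h * w == 2) = true
    · -- base block of two cells
      cases hbm : blockmax_alt arr r h c w with
      | none =>
        exact ⟨memo, hgood, by rw [Fpure.eq_def]; simp [hbase, hbm]⟩
      | some v =>
        have hF : Fpure arr r h c w = some v := by
          rw [Fpure.eq_def]; simp [hbase, hbm]
        exact ⟨memo.insert (r, h, c, w) v, pv_good_insert arr memo hgood r h c w v hF,
          by rw [Fpure.eq_def]; simp [hbase, hbm]⟩
    · by_cases hw2 : 1 < w
      · -- column split happens
        have hwlt : (pvHalf w).toNat < w.toNat := by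
          simp only [pvHalf, PySem.Int.floordiv_eq_ediv_of_pos (by norm_num : (0:Int) < 2)]
          omega
        cases hbm1 : blockmax_alt arr r h c (pvHalf w) with
        | none => exact ⟨memo, hgood, by rw [Fpure.eq_def]; simp [hbase, hw2, hbm1]⟩
        | some m1 =>
        obtain ⟨memo1, hg1, he1⟩ := ihN (h.toNat + (pvHalf w).toNat) (by omega)
          r h (c + pvHalf w) (pvHalf w) le_rfl memo hgood
        cases hF1 : Fpure arr r h (c + pvHalf w) (pvHalf w) with
        | none => exact ⟨memo, hgood, by rw [Fpure.eq_def]; simp [hbase, hw2, hbm1, he1, hF1]⟩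
        | some v1 =>
        cases hbm2 : blockmax_alt arr r h (c + pvHalf w) (pvHalf w) with
        | none => exact ⟨memo, hgood,
            by rw [Fpure.eq_def]; simp [hbase, hw2, hbm1, he1, hF1, hbm2]⟩
        | some m2 =>
        obtain ⟨memo2, hg2, he2⟩ := ihN (h.toNat + (pvHalf w).toNat) (by omega)
          r h c (pvHalf w) le_rfl memo1 hg1
        cases hF2 : Fpure arr r h c (pvHalf w) with
        | none => exact ⟨memo, hgood,
            by rw [Fpure.eq_def]; simp [hbase, hw2, hbm1, he1, hF1, hbm2, he2, hF2]⟩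
        | some v2 =>
        -- row section, starting from cand1 = [m1+v1, m2+v2] and memo2
        by_cases hh2 : 1 < h
        · have hhlt : (pvHalf h).toNat < h.toNat := by
            simp only [pvHalf, PySem.Int.floordiv_eq_ediv_of_pos (by norm_num : (0:Int) < 2)]
            omega
          cases hbm3 : blockmax_alt arr r (pvHalf h) c w with
          | none => exact ⟨memo, hgood,
              by rw [Fpure.eq_def]; simp [hbase, hw2, hbm1, he1, hF1, hbm2, he2, hF2, hh2, hbm3]⟩
          | some m3 =>
          obtain ⟨memo3, hg3, he3⟩ := ihN ((pvHalf h).toNat + w.toNat) (by omega)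
            (r + pvHalf h) (pvHalf h) c w le_rfl memo2 hg2
          cases hF3 : Fpure arr (r + pvHalf h) (pvHalf h) c w with
          | none => exact ⟨memo, hgood, by rw [Fpure.eq_def]; simp [hbase, hw2, hbm1, he1, hF1, hbm2, he2, hF2, hh2, hbm3, he3, hF3]⟩
          | some v3 =>
          cases hbm4 : blockmax_alt arr (r + pvHalf h) (pvHalf h) c w with
          | none => exact ⟨memo, hgood, by rw [Fpure.eq_def]; simp [hbase, hw2, hbm1, he1, hF1, hbm2, he2, hF2, hh2, hbm3, he3, hF3, hbm4]⟩
          | some m4 =>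
          obtain ⟨memo4, hg4, he4⟩ := ihN ((pvHalf h).toNat + w.toNat) (by omega)
            r (pvHalf h) c w le_rfl memo3 hg3
          cases hF4 : Fpure arr r (pvHalf h) c w with
          | none => exact ⟨memo, hgood, by rw [Fpure.eq_def]; simp [hbase, hw2, hbm1, he1, hF1, hbm2, he2, hF2, hh2, hbm3, he3, hF3, hbm4, he4, hF4]⟩
          | some v4 =>
          cases hmax : PySem.List.max? [m1 + v1, m2 + v2, m3 + v3, m4 + v4] (fun y => y) with
          | none => exact ⟨memo, hgood, by rw [Fpure.eq_def]; simp [hbase, hw2, hbm1, he1, hF1, hbm2, he2, hF2, hh2, hbm3, he3, hF3, hbm4, he4, hF4, hmax]⟩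
          | some v =>
            have hF : Fpure arr r h c w = some v := by
              rw [Fpure.eq_def]
              simp [hbase, hw2, hbm1, hF1, hbm2, hF2, hh2, hbm3, hF3, hbm4, hF4, hmax]
            exact ⟨memo4.insert (r, h, c, w) v, pv_good_insert arr memo4 hg4 r h c w v hF,
              by rw [Fpure.eq_def]; simp [hbase, hw2, hbm1, he1, hF1, hbm2, he2, hF2, hh2, hbm3, he3, hF3, hbm4, he4, hF4, hmax]⟩
        · -- no row split
          cases hmax : PySem.List.max? [m1 + v1, m2 + v2] (fun y => y) with
          | none => exact ⟨memo, hgood, by rw [Fpure.eq_def]; simp [hbase, hw2, hbm1, he1, hF1, hbm2, he2, hF2, hh2, hmax]⟩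
          | some v =>
            have hF : Fpure arr r h c w = some v := by
              rw [Fpure.eq_def]
              simp [hbase, hw2, hbm1, hF1, hbm2, hF2, hh2, hmax]
            exact ⟨memo2.insert (r, h, c, w) v, pv_good_insert arr memo2 hg2 r h c w v hF,
              by rw [Fpure.eq_def]; simp [hbase, hw2, hbm1, he1, hF1, hbm2, he2, hF2, hh2, hmax]⟩
      · -- no column split
        by_cases hh2 : 1 < h
        · have hhlt : (pvHalf h).toNat < h.toNat := by
            simp only [pvHalf, PySem.Int.floordiv_eq_ediv_of_pos (by norm_num : (0:Int) < 2)]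
            omega
          cases hbm3 : blockmax_alt arr r (pvHalf h) c w with
          | none => exact ⟨memo, hgood, by rw [Fpure.eq_def]; simp [hbase, hw2, hh2, hbm3]⟩
          | some m3 =>
          obtain ⟨memo3, hg3, he3⟩ := ihN ((pvHalf h).toNat + w.toNat) (by omega)
            (r + pvHalf h) (pvHalf h) c w le_rfl memo hgood
          cases hF3 : Fpure arr (r + pvHalf h) (pvHalf h) c w with
          | none => exact ⟨memo, hgood,
              by rw [Fpure.eq_def]; simp [hbase, hw2, hh2, hbm3, he3, hF3]⟩
          | some v3 =>
          cases hbm4 : blockmax_alt arr (r + pvHalf h) (pvHalf h) c w with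
          | none => exact ⟨memo, hgood,
              by rw [Fpure.eq_def]; simp [hbase, hw2, hh2, hbm3, he3, hF3, hbm4]⟩
          | some m4 =>
          obtain ⟨memo4, hg4, he4⟩ := ihN ((pvHalf h).toNat + w.toNat) (by omega)
            r (pvHalf h) c w le_rfl memo3 hg3
          cases hF4 : Fpure arr r (pvHalf h) c w with
          | none => exact ⟨memo, hgood,
              by rw [Fpure.eq_def]; simp [hbase, hw2, hh2, hbm3, he3, hF3, hbm4, he4, hF4]⟩
          | some v4 =>
          cases hmax : PySem.List.max? [m3 + v3, m4 + v4] (fun y => y) with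
          | none => exact ⟨memo, hgood, by rw [Fpure.eq_def]; simp [hbase, hw2, hh2, hbm3, he3, hF3, hbm4, he4, hF4, hmax]⟩
          | some v =>
            have hF : Fpure arr r h c w = some v := by
              rw [Fpure.eq_def]
              simp [hbase, hw2, hh2, hbm3, hF3, hbm4, hF4, hmax]
            exact ⟨memo4.insert (r, h, c, w) v, pv_good_insert arr memo4 hg4 r h c w v hF,
              by rw [Fpure.eq_def]; simp [hbase, hw2, hh2, hbm3, he3, hF3, hbm4, he4, hF4, hmax]⟩
        · -- neither split: quarters empty, max([]) raises on both sides
          exact ⟨memo, hgood, by rw [Fpure.eq_def]; simp [hbase, hw2, hh2, PySem.List.max?]⟩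

theorem pv_solution_alt_eq (arr : List (List Int)) :
    solution_alt arr = ((Fpure arr 0 arr.length 0 arr.length).map id).getD 0 := by
  have hg : GoodMemo arr PySem.Dict.empty := by
    intro r h c w v hv
    simp [PySem.Dict.get?_empty] at hv
  obtain ⟨memo', _, he⟩ := pv_f_alt_eq arr
    ((arr.length : Int).toNat + (arr.length : Int).toNat)
    0 arr.length 0 arr.length (le_refl _) PySem.Dict.empty hg
  cases hF : Fpure arr 0 arr.length 0 arr.length with
  | none => simp [solution_alt, he, hF]
  | some v => simp [solution_alt, he, hF]

-- ---- the main induction: A's sliced recursion = the coordinate recursion ----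
theorem pv_main (arr : List (List Int)) (hrect : ∀ row ∈ arr, row.length = arr.length) :
    ∀ s a b r c : Nat, a + b ≤ s → 1 ≤ a + b →
      r + 2 ^ a ≤ arr.length → c + 2 ^ b ≤ arr.length →
      ∃ v, Fpure arr (r : Int) ((2 ^ a : Nat) : Int) (c : Int) ((2 ^ b : Nat) : Int) = some v ∧
        ∀ L lm, pyMaxRows L = some lm →
          get_max L (pvSub arr r (2 ^ a) c (2 ^ b)) = some (lm + v) := by
  intro s
  induction s using Nat.strong_induction_on with
  | _ s ihS =>
  intro a b r c hs hab hra hcb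
  have hh0 : 0 < 2 ^ a := Nat.two_pow_pos a
  have hw0 : 0 < 2 ^ b := Nat.two_pow_pos b
  have hRlen := pv_sub_length arr r (2 ^ a) c (2 ^ b) hra
  have hRrows := pv_sub_rows arr r (2 ^ a) c (2 ^ b) hrect hcb
  have hRtot := pv_sub_tot arr r (2 ^ a) c (2 ^ b) hrect hra hcb
  by_cases hbase : a + b = 1
  · -- base: the block has exactly two cells
    have h2 : (2 : Nat) ^ a * 2 ^ b = 2 := by rw [← pow_add, hbase]; rfl
    have htot2 : pvTot (pvSub arr r (2 ^ a) c (2 ^ b)) = 2 := by rw [hRtot, h2]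
    have htwo : is_two (pvSub arr r (2 ^ a) c (2 ^ b)) = true := (pv_is_two_iff _).mpr htot2
    obtain ⟨m, hbm, _⟩ := pv_blockmax_isMax arr r (2 ^ a) c (2 ^ b) hrect hra hcb hh0 hw0
    have hpm : pyMaxRows (pvSub arr r (2 ^ a) c (2 ^ b)) = some m := by
      rw [pv_pyMaxRows_sub arr r (2 ^ a) c (2 ^ b) hrect hra hcb hh0 hw0, hbm]
    refine ⟨m, ?_, ?_⟩
    · have hbeq : ((((2 ^ a : Nat) : Int)) * (((2 ^ b : Nat) : Int)) == 2) = true := by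
        rw [beq_iff_eq]
        exact_mod_cast congrArg (Nat.cast (R := Int)) h2
      have hbeq2 : ((2 : Int) ^ a * (2 : Int) ^ b) = 2 := by exact_mod_cast h2
      rw [Fpure.eq_def]
      simp [hbeq, hbeq2]
      exact_mod_cast hbm
    · intro L lm hL
      rw [get_max.eq_def]
      simp [hL, htwo, hpm]
  · -- recursive case: at least four cells
    have hab2 : 2 ≤ a + b := by omega
    have h4 : 4 ≤ (2 : Nat) ^ a * 2 ^ b := by
      rw [← pow_add]
      calc (4 : Nat) = 2 ^ 2 := rfl
      _ ≤ 2 ^ (a + b) := Nat.pow_le_pow_right (by norm_num) hab2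
    have hbaseF : ((((2 ^ a : Nat) : Int)) * (((2 ^ b : Nat) : Int)) == 2) = false := by
      rw [beq_eq_false_iff_ne]
      have : (2 : Nat) ^ a * 2 ^ b ≠ 2 := by omega
      exact_mod_cast fun hx => this (by exact_mod_cast hx)
    have htwoF : is_two (pvSub arr r (2 ^ a) c (2 ^ b)) = false := by
      rw [Bool.eq_false_iff]
      intro hy
      have := (pv_is_two_iff _).mp hy
      omega
    -- the copied block, in cons form
    cases hR : pvSub arr r (2 ^ a) c (2 ^ b) with
    | nil =>
      rw [hR] at hRlen
      simp at hRlen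
      omega
    | cons r0 rs =>
    rw [hR] at hRlen htwoF
    have hr0 : r0.length = 2 ^ b := hRrows r0 (by rw [hR]; exact List.mem_cons_self ..)
    by_cases hbpos : 1 ≤ b <;> by_cases hapos : 1 ≤ a
    · -- both splits active
      set w' := 2 ^ (b - 1) with hw'pow
      set h' := 2 ^ (a - 1) with hh'pow
      have heW : (2 : Nat) ^ b = w' * 2 := by rw [hw'pow, ← pow_succ]; congr 1; omega
      have heH : (2 : Nat) ^ a = h' * 2 := by rw [hh'pow, ← pow_succ]; congr 1; omega
      have hwhalf : (2 : Nat) ^ b / 2 = w' := by rw [heW]; exact Nat.mul_div_cancel _ (by norm_num)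
      have hhhalf : (2 : Nat) ^ a / 2 = h' := by rw [heH]; exact Nat.mul_div_cancel _ (by norm_num)
      have hww' : w' + w' = 2 ^ b := by omega
      have hhh' : h' + h' = 2 ^ a := by omega
      have hw'0 : 0 < w' := by have := Nat.two_pow_pos (b - 1); omega
      have hh'0 : 0 < h' := by have := Nat.two_pow_pos (a - 1); omega
      -- column pieces
      obtain ⟨m1, hbm1, _⟩ := pv_blockmax_isMax arr r (2 ^ a) c w' hrect hra (by omega) hh0 hw'0
      obtain ⟨m2, hbm2, _⟩ := pv_blockmax_isMax arr r (2 ^ a) (c + w') w' hrect hra (by omega) hh0 hw'0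
      obtain ⟨v1, hF1, hG1⟩ := ihS (a + b - 1) (by omega) a (b - 1) r (c + w')
        (by omega) (by omega) hra (by rw [← hw'pow]; omega)
      obtain ⟨v2, hF2, hG2⟩ := ihS (a + b - 1) (by omega) a (b - 1) r c
        (by omega) (by omega) hra (by rw [← hw'pow]; omega)
      -- row pieces
      obtain ⟨m3, hbm3, _⟩ := pv_blockmax_isMax arr r h' c (2 ^ b) hrect (by omega) hcb hh'0 hw0
      obtain ⟨m4, hbm4, _⟩ := pv_blockmax_isMax arr (r + h') h' c (2 ^ b) hrect (by omega) hcb hh'0 hw0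
      obtain ⟨v3, hF3, hG3⟩ := ihS (a + b - 1) (by omega) (a - 1) b (r + h') c
        (by omega) (by omega) (by rw [← hh'pow]; omega) hcb
      obtain ⟨v4, hF4, hG4⟩ := ihS (a + b - 1) (by omega) (a - 1) b r c
        (by omega) (by omega) (by rw [← hh'pow]; omega) hcb
      rw [← hw'pow] at hF1 hG1 hF2 hG2
      rw [← hh'pow] at hF3 hG3 hF4 hG4
      -- left-half maxima as pyMaxRows
      have hpm1 : pyMaxRows (pvSub arr r (2 ^ a) c w') = some m1 := by
        rw [pv_pyMaxRows_sub arr r (2 ^ a) c w' hrect hra (by omega) hh0 hw'0, hbm1]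
      have hpm2 : pyMaxRows (pvSub arr r (2 ^ a) (c + w') w') = some m2 := by
        rw [pv_pyMaxRows_sub arr r (2 ^ a) (c + w') w' hrect hra (by omega) hh0 hw'0, hbm2]
      have hpm3 : pyMaxRows (pvSub arr r h' c (2 ^ b)) = some m3 := by
        rw [pv_pyMaxRows_sub arr r h' c (2 ^ b) hrect (by omega) hcb hh'0 hw0, hbm3]
      have hpm4 : pyMaxRows (pvSub arr (r + h') h' c (2 ^ b)) = some m4 := by
        rw [pv_pyMaxRows_sub arr (r + h') h' c (2 ^ b) hrect (by omega) hcb hh'0 hw0, hbm4]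
      -- cast facts
      have hHalfW : pvHalf (((2 ^ b : Nat) : Int)) = ((w' : Nat) : Int) := by
        rw [pv_half_cast, hwhalf]
      have hHalfH : pvHalf (((2 ^ a : Nat) : Int)) = ((h' : Nat) : Int) := by
        rw [pv_half_cast, hhhalf]
      have hcolI : (1 : Int) < ((2 ^ b : Nat) : Int) := by exact_mod_cast (by omega : 1 < 2 ^ b)
      have hrowI : (1 : Int) < ((2 ^ a : Nat) : Int) := by exact_mod_cast (by omega : 1 < 2 ^ a)
      refine ⟨List.foldl max (m1 + v1) [m2 + v2, m3 + v3, m4 + v4], ?_, ?_⟩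
      · rw [Fpure.eq_def]
        simp only [hbaseF, Bool.false_eq_true, if_false, hHalfW, hHalfH, dif_pos hcolI,
          dif_pos hrowI, Nat.cast_add, hbm1, hbm2, hbm3, hbm4, hF1, hF2, hF3, hF4, Option.bind_some]
        have hbm2' : blockmax_alt arr (r : Int) ((2 : Int) ^ a) ((c : Int) + (w' : Int)) (w' : Int)
            = some m2 := by exact_mod_cast hbm2
        have hF1' : Fpure arr (r : Int) ((2 : Int) ^ a) ((c : Int) + (w' : Int)) (w' : Int)
            = some v1 := by exact_mod_cast hF1
        have hbm4' : blockmax_alt arr ((r : Int) + (h' : Int)) (h' : Int) (c : Int) ((2 : Int) ^ b)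
            = some m4 := by exact_mod_cast hbm4
        have hF3' : Fpure arr ((r : Int) + (h' : Int)) (h' : Int) (c : Int) ((2 : Int) ^ b)
            = some v3 := by exact_mod_cast hF3
        simp [PySem.List.max?_id_cons, hF1', hF2, hF3', hF4, hbm1, hbm2', hbm3, hbm4']
      · intro L lm hL
        have hcolN : 1 < r0.length := by rw [hr0]; omega
        have hrowN : 1 < (r0 :: rs).length := by rw [hRlen]; omega
        have hq1 : (r0 :: rs).map (fun i => i.take (r0.length / 2)) = pvSub arr r (2 ^ a) c w' := by
          rw [hr0, hwhalf, ← hR, pv_sub_take_cols arr r (2 ^ a) c (2 ^ b) w' (by omega)]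
        have hq2 : (r0 :: rs).map (fun i => i.drop (r0.length / 2))
            = pvSub arr r (2 ^ a) (c + w') w' := by
          rw [hr0, hwhalf, ← hR, pv_sub_drop_cols arr r (2 ^ a) c (2 ^ b) w']
          congr 1
          omega
        have hq3 : (r0 :: rs).take ((r0 :: rs).length / 2) = pvSub arr r h' c (2 ^ b) := by
          rw [hRlen, hhhalf, ← hR, pv_sub_take_rows arr r (2 ^ a) c (2 ^ b) h' (by omega)]
        have hq4 : (r0 :: rs).drop ((r0 :: rs).length / 2) = pvSub arr (r + h') h' c (2 ^ b) := by
          rw [hRlen, hhhalf, ← hR, pv_sub_drop_rows arr r (2 ^ a) c (2 ^ b) h']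
          congr 1
          omega
        rw [get_max.eq_def]
        simp only [hL, htwoF, Bool.false_eq_true, if_false, Option.bind_some,
          dif_pos hcolN, dif_pos hrowN, hq1, hq2, hq3, hq4,
          hG1 (pvSub arr r (2 ^ a) c w') m1 hpm1,
          hG2 (pvSub arr r (2 ^ a) (c + w') w') m2 hpm2,
          hG3 (pvSub arr r h' c (2 ^ b)) m3 hpm3,
          hG4 (pvSub arr (r + h') h' c (2 ^ b)) m4 hpm4]
        simp [PySem.List.max?_id_cons]
    · -- only the column split (a = 0)
      set w' := 2 ^ (b - 1) with hw'pow
      have heW : (2 : Nat) ^ b = w' * 2 := by rw [hw'pow, ← pow_succ]; congr 1; omega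
      have hwhalf : (2 : Nat) ^ b / 2 = w' := by rw [heW]; exact Nat.mul_div_cancel _ (by norm_num)
      have hww' : w' + w' = 2 ^ b := by omega
      have hw'0 : 0 < w' := by have := Nat.two_pow_pos (b - 1); omega
      obtain ⟨m1, hbm1, _⟩ := pv_blockmax_isMax arr r (2 ^ a) c w' hrect hra (by omega) hh0 hw'0
      obtain ⟨m2, hbm2, _⟩ := pv_blockmax_isMax arr r (2 ^ a) (c + w') w' hrect hra (by omega) hh0 hw'0
      obtain ⟨v1, hF1, hG1⟩ := ihS (a + b - 1) (by omega) a (b - 1) r (c + w')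
        (by omega) (by omega) hra (by rw [← hw'pow]; omega)
      obtain ⟨v2, hF2, hG2⟩ := ihS (a + b - 1) (by omega) a (b - 1) r c
        (by omega) (by omega) hra (by rw [← hw'pow]; omega)
      rw [← hw'pow] at hF1 hG1 hF2 hG2
      have hpm1 : pyMaxRows (pvSub arr r (2 ^ a) c w') = some m1 := by
        rw [pv_pyMaxRows_sub arr r (2 ^ a) c w' hrect hra (by omega) hh0 hw'0, hbm1]
      have hpm2 : pyMaxRows (pvSub arr r (2 ^ a) (c + w') w') = some m2 := by
        rw [pv_pyMaxRows_sub arr r (2 ^ a) (c + w') w' hrect hra (by omega) hh0 hw'0, hbm2]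
      have hHalfW : pvHalf (((2 ^ b : Nat) : Int)) = ((w' : Nat) : Int) := by
        rw [pv_half_cast, hwhalf]
      have hcolI : (1 : Int) < ((2 ^ b : Nat) : Int) := by exact_mod_cast (by omega : 1 < 2 ^ b)
      have hrowIF : ¬ ((1 : Int) < ((2 ^ a : Nat) : Int)) := by
        have ha0 : a = 0 := by omega
        rw [ha0]
        norm_num
      refine ⟨List.foldl max (m1 + v1) [m2 + v2], ?_, ?_⟩
      · rw [Fpure.eq_def]
        simp only [hbaseF, Bool.false_eq_true, if_false, hHalfW, dif_pos hcolI,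
          dif_neg hrowIF, Nat.cast_add, hbm1, hbm2, hF1, hF2, Option.bind_some]
        have hbm2' : blockmax_alt arr (r : Int) ((2 : Int) ^ a) ((c : Int) + (w' : Int)) (w' : Int)
            = some m2 := by exact_mod_cast hbm2
        have hF1' : Fpure arr (r : Int) ((2 : Int) ^ a) ((c : Int) + (w' : Int)) (w' : Int)
            = some v1 := by exact_mod_cast hF1
        simp [PySem.List.max?_id_cons, hF1', hF2, hbm1, hbm2']
      · intro L lm hL
        have hcolN : 1 < r0.length := by rw [hr0]; omega
        have hrowNF : ¬ (1 < (r0 :: rs).length) := by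
          have ha0 : a = 0 := by omega
          rw [hRlen, ha0]
          norm_num
        have hq1 : (r0 :: rs).map (fun i => i.take (r0.length / 2)) = pvSub arr r (2 ^ a) c w' := by
          rw [hr0, hwhalf, ← hR, pv_sub_take_cols arr r (2 ^ a) c (2 ^ b) w' (by omega)]
        have hq2 : (r0 :: rs).map (fun i => i.drop (r0.length / 2))
            = pvSub arr r (2 ^ a) (c + w') w' := by
          rw [hr0, hwhalf, ← hR, pv_sub_drop_cols arr r (2 ^ a) c (2 ^ b) w']
          congr 1
          omega
        rw [get_max.eq_def]
        simp only [hL, htwoF, Bool.false_eq_true, if_false, Option.bind_some,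
          dif_pos hcolN, dif_neg hrowNF, hq1, hq2,
          hG1 (pvSub arr r (2 ^ a) c w') m1 hpm1,
          hG2 (pvSub arr r (2 ^ a) (c + w') w') m2 hpm2]
        simp [PySem.List.max?_id_cons]
    · -- only the row split (b = 0)
      set h' := 2 ^ (a - 1) with hh'pow
      have heH : (2 : Nat) ^ a = h' * 2 := by rw [hh'pow, ← pow_succ]; congr 1; omega
      have hhhalf : (2 : Nat) ^ a / 2 = h' := by rw [heH]; exact Nat.mul_div_cancel _ (by norm_num)
      have hhh' : h' + h' = 2 ^ a := by omega
      have hh'0 : 0 < h' := by have := Nat.two_pow_pos (a - 1); omega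
      obtain ⟨m3, hbm3, _⟩ := pv_blockmax_isMax arr r h' c (2 ^ b) hrect (by omega) hcb hh'0 hw0
      obtain ⟨m4, hbm4, _⟩ := pv_blockmax_isMax arr (r + h') h' c (2 ^ b) hrect (by omega) hcb hh'0 hw0
      obtain ⟨v3, hF3, hG3⟩ := ihS (a + b - 1) (by omega) (a - 1) b (r + h') c
        (by omega) (by omega) (by rw [← hh'pow]; omega) hcb
      obtain ⟨v4, hF4, hG4⟩ := ihS (a + b - 1) (by omega) (a - 1) b r c
        (by omega) (by omega) (by rw [← hh'pow]; omega) hcb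
      rw [← hh'pow] at hF3 hG3 hF4 hG4
      have hpm3 : pyMaxRows (pvSub arr r h' c (2 ^ b)) = some m3 := by
        rw [pv_pyMaxRows_sub arr r h' c (2 ^ b) hrect (by omega) hcb hh'0 hw0, hbm3]
      have hpm4 : pyMaxRows (pvSub arr (r + h') h' c (2 ^ b)) = some m4 := by
        rw [pv_pyMaxRows_sub arr (r + h') h' c (2 ^ b) hrect (by omega) hcb hh'0 hw0, hbm4]
      have hHalfH : pvHalf (((2 ^ a : Nat) : Int)) = ((h' : Nat) : Int) := by
        rw [pv_half_cast, hhhalf]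
      have hrowI : (1 : Int) < ((2 ^ a : Nat) : Int) := by
        exact_mod_cast (by omega : 1 < 2 ^ a)
      have hcolIF : ¬ ((1 : Int) < ((2 ^ b : Nat) : Int)) := by
        have hb0 : b = 0 := by omega
        rw [hb0]
        norm_num
      refine ⟨List.foldl max (m3 + v3) [m4 + v4], ?_, ?_⟩
      · rw [Fpure.eq_def]
        simp only [hbaseF, Bool.false_eq_true, if_false, hHalfH, dif_neg hcolIF,
          dif_pos hrowI, Nat.cast_add, hbm3, hbm4, hF3, hF4, Option.bind_some]
        have hbm4' : blockmax_alt arr ((r : Int) + (h' : Int)) (h' : Int) (c : Int) ((2 : Int) ^ b)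
            = some m4 := by exact_mod_cast hbm4
        have hF3' : Fpure arr ((r : Int) + (h' : Int)) (h' : Int) (c : Int) ((2 : Int) ^ b)
            = some v3 := by exact_mod_cast hF3
        simp [PySem.List.max?_id_cons, hF3', hF4, hbm3, hbm4']
      · intro L lm hL
        have hrowN : 1 < (r0 :: rs).length := by rw [hRlen]; omega
        have hcolNF : ¬ (1 < r0.length) := by
          have hb0 : b = 0 := by omega
          rw [hr0, hb0]
          norm_num
        have hq3 : (r0 :: rs).take ((r0 :: rs).length / 2) = pvSub arr r h' c (2 ^ b) := by
          rw [hRlen, hhhalf, ← hR, pv_sub_take_rows arr r (2 ^ a) c (2 ^ b) h' (by omega)]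
        have hq4 : (r0 :: rs).drop ((r0 :: rs).length / 2) = pvSub arr (r + h') h' c (2 ^ b) := by
          rw [hRlen, hhhalf, ← hR, pv_sub_drop_rows arr r (2 ^ a) c (2 ^ b) h']
          congr 1
          omega
        rw [get_max.eq_def]
        simp only [hL, htwoF, Bool.false_eq_true, if_false, Option.bind_some,
          dif_neg hcolNF, dif_pos hrowN, hq3, hq4,
          hG3 (pvSub arr r h' c (2 ^ b)) m3 hpm3,
          hG4 (pvSub arr (r + h') h' c (2 ^ b)) m4 hpm4]
        simp [PySem.List.max?_id_cons]
    · omega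

-- ===== VERDICT (by name: the statement is the Claim_ definition above) =====
-- pvSub of the whole grid is the grid itself
theorem pv_sub_self (arr : List (List Int)) (hrect : ∀ row ∈ arr, row.length = arr.length) :
    pvSub arr 0 arr.length 0 arr.length = arr := by
  unfold pvSub
  rw [List.drop_zero, List.take_length]
  have h : ∀ row ∈ arr, (row.drop 0).take arr.length = id row := by
    intro row hrow
    rw [List.drop_zero, List.take_of_length_le (le_of_eq (hrect row hrow))]
    rfl
  rw [List.map_congr_left h, List.map_id]

-- ===== VERDICT (by name: the statement is the Claim_ definition above) =====
theorem solution_spec : Claim_equal_solution := by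
  intro arr _hdom hpre
  unfold Spec_solution
  obtain ⟨⟨k, _, hn⟩, hrect⟩ := hpre
  have hpow : (2 : Nat) ^ k + 2 ^ k = 2 ^ (k + 1) := by rw [pow_succ]; omega
  have hhalf : (2 : Nat) ^ (k + 1) / 2 = 2 ^ k := by
    rw [pow_succ]; exact Nat.mul_div_cancel _ (by norm_num)
  have hk0 : 0 < (2 : Nat) ^ k := Nat.two_pow_pos k
  have hk1 : 0 < (2 : Nat) ^ (k + 1) := Nat.two_pow_pos (k + 1)
  have hself2 : pvSub arr 0 (2 ^ (k + 1)) 0 (2 ^ (k + 1)) = arr := by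
    have h := pv_sub_self arr hrect
    rw [hn] at h
    exact h
  -- the four top-level splits are dyadic sub-blocks
  have ht1 : arr.map (fun i => i.take (arr.length / 2)) = pvSub arr 0 (2 ^ (k + 1)) 0 (2 ^ k) := by
    calc arr.map (fun i => i.take (arr.length / 2))
        = (pvSub arr 0 (2 ^ (k + 1)) 0 (2 ^ (k + 1))).map (fun i => i.take (2 ^ k)) := by
          rw [hself2, hn, hhalf]
      _ = pvSub arr 0 (2 ^ (k + 1)) 0 (2 ^ k) :=
          pv_sub_take_cols arr 0 (2 ^ (k + 1)) 0 (2 ^ (k + 1)) (2 ^ k) (by omega)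
  have ht2 : arr.map (fun i => i.drop (arr.length / 2))
      = pvSub arr 0 (2 ^ (k + 1)) (2 ^ k) (2 ^ k) := by
    calc arr.map (fun i => i.drop (arr.length / 2))
        = (pvSub arr 0 (2 ^ (k + 1)) 0 (2 ^ (k + 1))).map (fun i => i.drop (2 ^ k)) := by
          rw [hself2, hn, hhalf]
      _ = pvSub arr 0 (2 ^ (k + 1)) (0 + 2 ^ k) (2 ^ (k + 1) - 2 ^ k) :=
          pv_sub_drop_cols arr 0 (2 ^ (k + 1)) 0 (2 ^ (k + 1)) (2 ^ k)
      _ = pvSub arr 0 (2 ^ (k + 1)) (2 ^ k) (2 ^ k) := by rw [Nat.zero_add]; congr 1; omega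
  have ht3 : arr.take (arr.length / 2) = pvSub arr 0 (2 ^ k) 0 (2 ^ (k + 1)) := by
    calc arr.take (arr.length / 2)
        = (pvSub arr 0 (2 ^ (k + 1)) 0 (2 ^ (k + 1))).take (2 ^ k) := by rw [hself2, hn, hhalf]
      _ = pvSub arr 0 (2 ^ k) 0 (2 ^ (k + 1)) :=
          pv_sub_take_rows arr 0 (2 ^ (k + 1)) 0 (2 ^ (k + 1)) (2 ^ k) (by omega)
  have ht4 : arr.drop (arr.length / 2) = pvSub arr (2 ^ k) (2 ^ k) 0 (2 ^ (k + 1)) := by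
    calc arr.drop (arr.length / 2)
        = (pvSub arr 0 (2 ^ (k + 1)) 0 (2 ^ (k + 1))).drop (2 ^ k) := by rw [hself2, hn, hhalf]
      _ = pvSub arr (0 + 2 ^ k) (2 ^ (k + 1) - 2 ^ k) 0 (2 ^ (k + 1)) :=
          pv_sub_drop_rows arr 0 (2 ^ (k + 1)) 0 (2 ^ (k + 1)) (2 ^ k)
      _ = pvSub arr (2 ^ k) (2 ^ k) 0 (2 ^ (k + 1)) := by rw [Nat.zero_add]; congr 1; omega
  -- maxima of the four halves
  obtain ⟨m1, hbm1, _⟩ := pv_blockmax_isMax arr 0 (2 ^ (k + 1)) 0 (2 ^ k) hrect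
    (by rw [hn]; omega) (by rw [hn]; omega) hk1 hk0
  obtain ⟨m2, hbm2, _⟩ := pv_blockmax_isMax arr 0 (2 ^ (k + 1)) (2 ^ k) (2 ^ k) hrect
    (by rw [hn]; omega) (by rw [hn]; omega) hk1 hk0
  obtain ⟨m3, hbm3, _⟩ := pv_blockmax_isMax arr 0 (2 ^ k) 0 (2 ^ (k + 1)) hrect
    (by rw [hn]; omega) (by rw [hn]; omega) hk0 hk1
  obtain ⟨m4, hbm4, _⟩ := pv_blockmax_isMax arr (2 ^ k) (2 ^ k) 0 (2 ^ (k + 1)) hrect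
    (by rw [hn]; omega) (by rw [hn]; omega) hk0 hk1
  have hpm1 : pyMaxRows (pvSub arr 0 (2 ^ (k + 1)) 0 (2 ^ k)) = some m1 := by
    rw [pv_pyMaxRows_sub arr 0 (2 ^ (k + 1)) 0 (2 ^ k) hrect
      (by rw [hn]; omega) (by rw [hn]; omega) hk1 hk0, hbm1]
  have hpm2 : pyMaxRows (pvSub arr 0 (2 ^ (k + 1)) (2 ^ k) (2 ^ k)) = some m2 := by
    rw [pv_pyMaxRows_sub arr 0 (2 ^ (k + 1)) (2 ^ k) (2 ^ k) hrect
      (by rw [hn]; omega) (by rw [hn]; omega) hk1 hk0, hbm2]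
  have hpm3 : pyMaxRows (pvSub arr 0 (2 ^ k) 0 (2 ^ (k + 1))) = some m3 := by
    rw [pv_pyMaxRows_sub arr 0 (2 ^ k) 0 (2 ^ (k + 1)) hrect
      (by rw [hn]; omega) (by rw [hn]; omega) hk0 hk1, hbm3]
  have hpm4 : pyMaxRows (pvSub arr (2 ^ k) (2 ^ k) 0 (2 ^ (k + 1))) = some m4 := by
    rw [pv_pyMaxRows_sub arr (2 ^ k) (2 ^ k) 0 (2 ^ (k + 1)) hrect
      (by rw [hn]; omega) (by rw [hn]; omega) hk0 hk1, hbm4]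
  -- the four recursive values
  obtain ⟨v1, hF1, hG1⟩ := pv_main arr hrect (2 * k + 1) (k + 1) k 0 (2 ^ k)
    (by omega) (by omega) (by rw [hn]; omega) (by rw [hn]; omega)
  obtain ⟨v2, hF2, hG2⟩ := pv_main arr hrect (2 * k + 1) (k + 1) k 0 0
    (by omega) (by omega) (by rw [hn]; omega) (by rw [hn]; omega)
  obtain ⟨v3, hF3, hG3⟩ := pv_main arr hrect (2 * k + 1) k (k + 1) (2 ^ k) 0
    (by omega) (by omega) (by rw [hn]; omega) (by rw [hn]; omega)
  obtain ⟨v4, hF4, hG4⟩ := pv_main arr hrect (2 * k + 1) k (k + 1) 0 0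
    (by omega) (by omega) (by rw [hn]; omega) (by rw [hn]; omega)
  -- evaluate A's side
  have hsol : solution arr = max (max (max (m1 + v1) (m2 + v2)) (m3 + v3)) (m4 + v4) := by
    simp only [solution]
    rw [ht1, ht2, ht3, ht4,
      hG1 (pvSub arr 0 (2 ^ (k + 1)) 0 (2 ^ k)) m1 hpm1,
      hG2 (pvSub arr 0 (2 ^ (k + 1)) (2 ^ k) (2 ^ k)) m2 hpm2,
      hG3 (pvSub arr 0 (2 ^ k) 0 (2 ^ (k + 1))) m3 hpm3,
      hG4 (pvSub arr (2 ^ k) (2 ^ k) 0 (2 ^ (k + 1))) m4 hpm4]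
    rfl
  -- evaluate B's side
  rw [pv_solution_alt_eq arr, hn, hsol, Fpure.eq_def]
  have h2le : 2 ≤ (2 : Nat) ^ (k + 1) := by omega
  have hbaseF : ((((2 ^ (k + 1) : Nat) : Int)) * (((2 ^ (k + 1) : Nat) : Int)) == 2) = false := by
    rw [beq_eq_false_iff_ne]
    have h4 : 4 ≤ (2 : Nat) ^ (k + 1) * 2 ^ (k + 1) := by
      have := Nat.mul_le_mul h2le h2le
      omega
    intro hx
    have : (2 : Nat) ^ (k + 1) * 2 ^ (k + 1) = 2 := by exact_mod_cast hx
    omega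
  have hHalf : pvHalf (((2 ^ (k + 1) : Nat) : Int)) = ((2 ^ k : Nat) : Int) := by
    rw [pv_half_cast, hhalf]
  have hcolI : (1 : Int) < ((2 ^ (k + 1) : Nat) : Int) := by
    exact_mod_cast (by omega : 1 < 2 ^ (k + 1))
  simp only [hbaseF, Bool.false_eq_true, if_false, hHalf, dif_pos hcolI, Option.bind_some]
  have hbm1' : blockmax_alt arr 0 ((2 : Int) ^ (k + 1)) 0 ((2 : Int) ^ k) = some m1 := by
    exact_mod_cast hbm1
  have hbm2' : blockmax_alt arr 0 ((2 : Int) ^ (k + 1)) ((2 : Int) ^ k) ((2 : Int) ^ k)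
      = some m2 := by exact_mod_cast hbm2
  have hbm3' : blockmax_alt arr 0 ((2 : Int) ^ k) 0 ((2 : Int) ^ (k + 1)) = some m3 := by
    exact_mod_cast hbm3
  have hbm4' : blockmax_alt arr ((2 : Int) ^ k) ((2 : Int) ^ k) 0 ((2 : Int) ^ (k + 1))
      = some m4 := by exact_mod_cast hbm4
  have hF1' : Fpure arr 0 ((2 : Int) ^ (k + 1)) ((2 : Int) ^ k) ((2 : Int) ^ k) = some v1 := by
    exact_mod_cast hF1
  have hF2' : Fpure arr 0 ((2 : Int) ^ (k + 1)) 0 ((2 : Int) ^ k) = some v2 := by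
    exact_mod_cast hF2
  have hF3' : Fpure arr ((2 : Int) ^ k) ((2 : Int) ^ k) 0 ((2 : Int) ^ (k + 1)) = some v3 := by
    exact_mod_cast hF3
  have hF4' : Fpure arr 0 ((2 : Int) ^ k) 0 ((2 : Int) ^ (k + 1)) = some v4 := by
    exact_mod_cast hF4
  simp [hF1', hF2', hF3', hF4', hbm1', hbm2', hbm3', hbm4', PySem.List.max?_id_cons]
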